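-- pv_equiv track=rewrite | github.com/wislish/Python-Data-Analysis | Game-Analysis/userProfile.py | realPlayTime
-- ===== SOURCE A (Python) =====
-- def realPlayTime(timeList, begin_date, end_date, threshold = 300):
--
--     during_time = 0
--     truncL = [t for t in timeList if t <= end_date and t >= begin_date]
--
--     begin_time = truncL[0]
--     last_time = begin_time
--     for t in truncL:
--
--         if t - last_time > threshold:
--             during_time += (last_time - begin_time)
--             begin_time = t
--
--         last_time = t
--
--     during_time += (last_time - begin_time)
--
--     return during_time
-- ===== SOURCE B (Python) =====
-- def realPlayTime(timeList, begin_date, end_date, threshold=300):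
--     truncL = [t for t in timeList if begin_date <= t <= end_date]
--     total = 0
--     last = truncL[0]
--     for t in truncL[1:]:
--         if t - last <= threshold:
--             total += t - last
--         last = t
--     return total
-- ===== Notes on version B (the rewrite author's own statement) =====
-- stated objective: simpler
-- what changed: Replaces the begin_time/last_time session-tracking loop by a single pairwise sum of adjacent in-range differences not exceeding the threshold.
import Mathlib
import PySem

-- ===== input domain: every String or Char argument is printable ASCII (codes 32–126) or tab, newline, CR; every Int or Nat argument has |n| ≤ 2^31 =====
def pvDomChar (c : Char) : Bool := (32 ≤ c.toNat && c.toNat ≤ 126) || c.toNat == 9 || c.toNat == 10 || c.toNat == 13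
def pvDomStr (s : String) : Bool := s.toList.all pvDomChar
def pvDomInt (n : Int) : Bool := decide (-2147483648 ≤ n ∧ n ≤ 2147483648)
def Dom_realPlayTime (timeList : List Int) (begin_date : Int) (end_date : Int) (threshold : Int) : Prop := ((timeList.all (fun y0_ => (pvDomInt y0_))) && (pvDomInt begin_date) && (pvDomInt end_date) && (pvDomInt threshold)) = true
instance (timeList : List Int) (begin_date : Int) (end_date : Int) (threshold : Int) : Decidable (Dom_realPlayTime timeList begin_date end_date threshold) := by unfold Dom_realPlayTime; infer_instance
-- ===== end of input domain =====

-- B replaces A's begin_time/last_time session bookkeeping by directly accumulating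
-- each adjacent in-range difference ≤ threshold (simpler decomposition, same cost).


-- ===== PORT A =====
-- A's loop state: (during_time, begin_time, last_time)
def realPlayTimeStep (threshold : Int) (s : Int × Int × Int) (t : Int) : Int × Int × Int :=
  if t - s.2.2 > threshold then (s.1 + (s.2.2 - s.2.1), t, t) else (s.1, s.2.1, t)

def realPlayTime (timeList : List Int) (begin_date : Int) (end_date : Int) (threshold : Int) : Int :=
  let truncL := timeList.filter (fun t => t ≤ end_date && begin_date ≤ t)
  match truncL with
  | [] => 0  -- Python raises IndexError at truncL[0]; excluded by Pre_realPlayTime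
  | b0 :: _ =>
    let s := truncL.foldl (realPlayTimeStep threshold) (0, b0, b0)
    s.1 + (s.2.2 - s.2.1)

-- ===== PORT B =====
def realPlayTime_alt (timeList : List Int) (begin_date : Int) (end_date : Int) (threshold : Int) : Int :=
  let truncL := timeList.filter (fun t => begin_date ≤ t && t ≤ end_date)
  match truncL with
  | [] => 0  -- Python raises IndexError at truncL[0]; excluded by Pre_realPlayTime
  | b0 :: rest =>
    (rest.foldl (fun (s : Int × Int) t =>
      (if t - s.2 ≤ threshold then s.1 + (t - s.2) else s.1, t)) (0, b0)).1

-- ===== PRECONDITION & SPEC =====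
-- Pre_ excludes exactly the inputs where truncL is empty: there A raises IndexError.
def Pre_realPlayTime (timeList : List Int) (begin_date : Int) (end_date : Int) (threshold : Int) : Prop :=
  ∃ t ∈ timeList, begin_date ≤ t ∧ t ≤ end_date
instance (timeList : List Int) (begin_date : Int) (end_date : Int) (threshold : Int) : Decidable (Pre_realPlayTime timeList begin_date end_date threshold) := by unfold Pre_realPlayTime; infer_instance

def pvWitness_realPlayTime : List Int × Int × Int × Int := ([1, 5, 100, 103], 0, 200, 10)


def Spec_realPlayTime (timeList : List Int) (begin_date : Int) (end_date : Int) (threshold : Int) (out : Int) : Prop := out = realPlayTime_alt timeList begin_date end_date threshold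
instance (timeList : List Int) (begin_date : Int) (end_date : Int) (threshold : Int) (out : Int) : Decidable (Spec_realPlayTime timeList begin_date end_date threshold out) := by unfold Spec_realPlayTime; infer_instance

-- ===== CLAIM (what is proved, stated in full; the proofs are below) =====
def Claim_equal_realPlayTime : Prop := ∀ (timeList : List Int) (begin_date : Int) (end_date : Int) (threshold : Int), Dom_realPlayTime timeList begin_date end_date threshold → Pre_realPlayTime timeList begin_date end_date threshold → Spec_realPlayTime timeList begin_date end_date threshold (realPlayTime timeList begin_date end_date threshold)

-- ===== LEMMAS AND PROOFS =====

-- sum of capped adjacent differences, B's quantity in recursive form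
def gapSum (threshold prev : Int) : List Int → Int
  | [] => 0
  | t :: rest => (if t - prev ≤ threshold then t - prev else 0) + gapSum threshold t rest

theorem foldA_gapSum (threshold : Int) (l : List Int) :
    ∀ d b lt, (let s := l.foldl (realPlayTimeStep threshold) (d, b, lt);
      s.1 + (s.2.2 - s.2.1)) = d + (lt - b) + gapSum threshold lt l := by
  induction l with
  | nil => intro d b lt; simp [gapSum]
  | cons t rest ih =>
    intro d b lt
    simp only [List.foldl_cons, gapSum, realPlayTimeStep]
    by_cases h : t - lt > threshold
    · rw [if_pos h, if_neg (by omega)]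
      simp only [ih]
      omega
    · rw [if_neg h, if_pos (by omega)]
      simp only [ih]
      omega

theorem foldB_gapSum (threshold : Int) (l : List Int) :
    ∀ prev d, (l.foldl (fun (s : Int × Int) t =>
        (if t - s.2 ≤ threshold then s.1 + (t - s.2) else s.1, t)) (d, prev)).1
      = d + gapSum threshold prev l := by
  induction l with
  | nil => intro prev d; simp [gapSum]
  | cons t rest ih =>
    intro prev d
    simp only [List.foldl_cons, gapSum]
    by_cases h : t - prev ≤ threshold
    · rw [if_pos h, if_pos h, ih]; omega
    · rw [if_neg h, if_neg h, ih]; omega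

theorem filter_comm_pred (begin_date end_date : Int) (timeList : List Int) :
    timeList.filter (fun t => t ≤ end_date && begin_date ≤ t)
      = timeList.filter (fun t => begin_date ≤ t && t ≤ end_date) := by
  apply List.filter_congr
  intro t _
  simp [Bool.and_comm]

-- ===== VERDICT (by name: the statement is the Claim_ definition above) =====
theorem realPlayTime_spec : Claim_equal_realPlayTime := by
  intro timeList begin_date end_date threshold _ hpre
  unfold Spec_realPlayTime realPlayTime realPlayTime_alt
  rw [← filter_comm_pred]
  obtain ⟨t, ht, h1, h2⟩ := hpre
  have hmem : t ∈ timeList.filter (fun t => t ≤ end_date && begin_date ≤ t) := by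
    simp [List.mem_filter, ht, h1, h2]
  cases hfl : timeList.filter (fun t => t ≤ end_date && begin_date ≤ t) with
  | nil => rw [hfl] at hmem
  | cons b0 rest =>
    simp only []
    have hA := foldA_gapSum threshold (b0 :: rest) 0 b0 b0
    simp only [] at hA
    rw [hA]
    -- first step of A's fold contributes nothing; B folds over the tail
    have hB := foldB_gapSum threshold rest b0 0
    rw [hB]
    simp only [gapSum]
    by_cases h : b0 - b0 ≤ threshold
    · rw [if_pos h]; omega
    · rw [if_neg h]; omega
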